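-- pv_equiv track=rewrite | github.com/26remph/algorithms | leetcode/yandex/849_Maximize_Distance.py | _zmaxDistToClosest
-- ===== SOURCE A (Python) =====
-- import math
-- from typing import List
--
-- def _zmaxDistToClosest(seats: List[int]) -> int:
--
--     max_dist = 1
--
--     zero = 0
--     i = 0
--     while seats[i] != 1:
--         zero += 1
--         i += 1
--     max_dist = max(max_dist, zero)
--
--     j = len(seats) - 1
--     zero = 0
--     while seats[j] != 1:
--         zero += 1
--         j -= 1
--     max_dist = max(max_dist, zero)
--
--     zero = 0
--     for i in range(i, j + 1):
--         if seats[i] == 1: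
--             zero = 0
--         else:
--             zero += 1
--
--         max_dist = max(math.ceil(zero / 2), max_dist)
--
--     return max_dist
-- ===== SOURCE B (Python) =====
-- def _zmaxDistToClosest(seats):
--     ones = [i for i, s in enumerate(seats) if s == 1]
--     best = max(ones[0], len(seats) - 1 - ones[-1], 1)
--     for a, b in zip(ones, ones[1:]):
--         best = max(best, (b - a) // 2)
--     return best
-- ===== Notes on version B (the rewrite author's own statement) =====
-- stated objective: alternative
-- what changed: Replaced the three sequential counter scans over every seat by a position table (list of indices of occupied seats) with closed-form gap arithmetic (b-a)//2 over consecutive occupied positions.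
import Mathlib
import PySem

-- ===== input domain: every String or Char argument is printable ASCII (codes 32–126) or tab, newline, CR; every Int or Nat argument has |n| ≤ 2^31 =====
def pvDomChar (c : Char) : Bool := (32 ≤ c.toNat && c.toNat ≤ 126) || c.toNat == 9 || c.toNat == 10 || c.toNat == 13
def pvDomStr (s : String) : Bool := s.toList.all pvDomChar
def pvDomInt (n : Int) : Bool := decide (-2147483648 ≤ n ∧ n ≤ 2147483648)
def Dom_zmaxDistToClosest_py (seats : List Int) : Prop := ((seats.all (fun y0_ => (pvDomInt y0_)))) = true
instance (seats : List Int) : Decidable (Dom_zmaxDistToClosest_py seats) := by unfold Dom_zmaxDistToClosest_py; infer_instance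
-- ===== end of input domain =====

-- B replaces A's three sequential counter scans by a position table of the occupied
-- seats and closed-form gap arithmetic over consecutive occupied positions (objective:
-- alternative decomposition, same O(n) cost).

-- ===== PORT A =====
-- first while loop: i starts at 0 and only increases; fuel = seats.length suffices
-- whenever a 1 is present (Pre_); if the index leaves the list Python raises
-- IndexError, modelled by stopping with .getD 1 (such inputs are outside Pre_, nothing claimed).
def zDscanL (seats : List Int) (fuel : Nat) (i : Nat) (zero : Int) : Int × Nat :=
  match fuel with
  | 0 => (zero, i)
  | f + 1 =>
    if (PySem.List.pyGet? seats (Int.ofNat i)).getD 1 ≠ 1 then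
      zDscanL seats f (i + 1) (zero + 1)
    else (zero, i)

-- second while loop: j starts at len-1 and decreases; pyGet? gives Python's negative
-- index semantics; same fuel/.getD 1 treatment for the (excluded) inputs without a 1.
def zDscanR (seats : List Int) (fuel : Nat) (j : Int) (zero : Int) : Int × Int :=
  match fuel with
  | 0 => (zero, j)
  | f + 1 =>
    if (PySem.List.pyGet? seats j).getD 1 ≠ 1 then
      zDscanR seats f (j - 1) (zero + 1)
    else (zero, j)

-- the body of the third (for) loop on state (zero, max_dist);
-- math.ceil(zero / 2) for the nonnegative int counter zero is exactly (zero + 1) // 2.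
def zDstep (seats : List Int) (st : Int × Int) (k : Int) : Int × Int :=
  let zero : Int := if (PySem.List.pyGet? seats k).getD 0 = 1 then 0 else st.1 + 1
  (zero, max (PySem.Int.floordiv (zero + 1) 2) st.2)

def zmaxDistToClosest_py (seats : List Int) : Int :=
  let max_dist : Int := 1
  let s1 := zDscanL seats seats.length 0 0
  let max_dist := max max_dist s1.1
  let s2 := zDscanR seats seats.length ((seats.length : Int) - 1) 0
  let max_dist := max max_dist s2.1
  ((PySem.List.pyRange (Int.ofNat s1.2) (s2.2 + 1) 1).foldl (zDstep seats) (0, max_dist)).2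

-- ===== PORT B =====
-- B-side helper: ones = [i for i, s in enumerate(seats) if s == 1]
def pvOnes (seats : List Int) : List Int :=
  ((PySem.List.enumerate seats).filter (fun p => p.2 == 1)).map (fun p => p.1)

-- on empty ones Python raises IndexError at ones[0] (outside Pre_): dead [] branch.
def zmaxDistToClosest_py_alt (seats : List Int) : Int :=
  let ones : List Int := pvOnes seats
  match ones with
  | [] => 0
  | f :: _ =>
    let l := ones.getLastD 0
    let best : Int := max (max f ((seats.length : Int) - 1 - l)) 1
    (ones.zip ones.tail).foldl (fun best p => max best (PySem.Int.floordiv (p.2 - p.1) 2)) best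

-- ===== PRECONDITION & SPEC =====
-- Pre_ excludes exactly the inputs with no occupied seat (no element equal to 1):
-- there A's first while loop runs off the list and raises IndexError (B raises too, at ones[0]).
def Pre_zmaxDistToClosest_py (seats : List Int) : Prop := (1 : Int) ∈ seats
instance (seats : List Int) : Decidable (Pre_zmaxDistToClosest_py seats) := by unfold Pre_zmaxDistToClosest_py; infer_instance

def pvWitness_zmaxDistToClosest_py : List Int := [0, 1, 0, 0]

def Spec_zmaxDistToClosest_py (seats : List Int) (out : Int) : Prop := out = zmaxDistToClosest_py_alt seats
instance (seats : List Int) (out : Int) : Decidable (Spec_zmaxDistToClosest_py seats out) := by unfold Spec_zmaxDistToClosest_py; infer_instance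

-- ===== CLAIM (what is proved, stated in full; the proofs are below) =====
def Claim_equal_zmaxDistToClosest_py : Prop := ∀ (seats : List Int), Dom_zmaxDistToClosest_py seats → Pre_zmaxDistToClosest_py seats → Spec_zmaxDistToClosest_py seats (zmaxDistToClosest_py seats)

-- ===== LEMMAS AND PROOFS =====

theorem pv_fdiv2 (x : Int) : PySem.Int.floordiv x 2 = x / 2 :=
  PySem.Int.floordiv_eq_ediv_of_pos (by norm_num)

theorem pvOnes_mem (seats : List Int) (x : Int) :
    x ∈ pvOnes seats ↔ ∃ (k : Nat) (h : k < seats.length), x = (k : Int) ∧ seats[k] = 1 := by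
  unfold pvOnes
  simp only [List.mem_map, List.mem_filter, PySem.List.mem_enumerate_iff]
  constructor
  · rintro ⟨p, ⟨⟨k, hk, rfl⟩, hp⟩, rfl⟩
    exact ⟨k, hk, by simp, by simpa using hp⟩
  · rintro ⟨k, hk, rfl, h1⟩
    exact ⟨((k : Int), seats[k]), ⟨⟨k, hk, by simp⟩, by simpa⟩, rfl⟩

theorem pvOnes_pairwise (seats : List Int) : (pvOnes seats).Pairwise (· < ·) := by
  unfold pvOnes
  rw [List.pairwise_map]
  exact (PySem.List.pairwise_lt_enumerate seats 0).filter _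

theorem pvOnes_ne_nil (seats : List Int) (h : (1 : Int) ∈ seats) : pvOnes seats ≠ [] := by
  obtain ⟨k, hk, hke⟩ := List.mem_iff_getElem.mp h
  exact List.ne_nil_of_mem ((pvOnes_mem seats k).mpr ⟨k, hk, rfl, hke⟩)

-- the default of getLastD is irrelevant on a nonempty list
theorem pv_getLastD_irrel (l : List Int) (h : l ≠ []) (d d' : Int) :
    l.getLastD d = l.getLastD d' := by
  rw [List.getLastD_eq_getLast?, List.getLastD_eq_getLast?, List.getLast?_eq_some_getLast h]
  rfl

-- head of a <-sorted list is at most every element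
theorem pv_head_le (b x : Int) (t : List Int) (hs : (b :: t).Pairwise (· < ·))
    (hx : x ∈ b :: t) : b ≤ x := by
  rcases List.mem_cons.mp hx with rfl | hx'
  · exact le_refl x
  · exact le_of_lt (List.rel_of_pairwise_cons hs hx')

-- any element of a <-sorted list is at most its last element
theorem pv_le_getLastD (os : List Int) : ∀ (d : Int), os.Pairwise (· < ·) →
    ∀ x ∈ os, x ≤ os.getLastD d := by
  induction os with
  | nil => intro d _ x hx; cases hx
  | cons a t ih =>
    intro d hs x hx
    cases t with
    | nil =>
      rcases List.mem_singleton.mp hx with rfl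
      simp
    | cons b t' =>
      rw [List.getLastD_cons]
      rcases List.mem_cons.mp hx with rfl | hx'
      · exact le_trans (le_of_lt (List.rel_of_pairwise_cons hs List.mem_cons_self))
          (ih x hs.of_cons b List.mem_cons_self)
      · exact ih a hs.of_cons x hx'

theorem pv_getLastD_mem (os : List Int) (d : Int) (h : os ≠ []) : os.getLastD d ∈ os := by
  rw [List.getLastD_eq_getLast?, List.getLast?_eq_some_getLast h, Option.getD_some]
  exact List.getLast_mem h

-- characterisation of the first while loop
theorem zDscanL_spec (seats : List Int) (F : Nat) (hFn : F < seats.length)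
    (hF1 : seats[F] = 1) (hFmin : ∀ k : Nat, k < F → (hk : k < seats.length) → seats[k] ≠ 1) :
    ∀ (fuel m : Nat) (z : Int), m ≤ F → F - m < fuel →
      zDscanL seats fuel m z = (z + ((F : Int) - (m : Int)), F) := by
  intro fuel
  induction fuel with
  | zero => intro m z hm hlt; omega
  | succ f ih =>
    intro m z hm hlt
    have hmn : m < seats.length := by omega
    have hget : PySem.List.pyGet? seats (Int.ofNat m) = some seats[m] := by
      rw [Int.ofNat_eq_natCast, PySem.List.pyGet?_natCast]
      exact List.getElem?_eq_getElem hmn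
    rcases Nat.eq_or_lt_of_le hm with rfl | hmF
    · simp only [zDscanL, hget, Option.getD_some, hF1, ne_eq, not_true_eq_false, if_false]
      simp only [Prod.mk.injEq]
      exact ⟨by omega, trivial⟩
    · have hne : seats[m] ≠ 1 := hFmin m hmF hmn
      simp only [zDscanL, hget, Option.getD_some, ne_eq, hne, not_false_eq_true, if_true]
      rw [ih (m + 1) (z + 1) hmF (by omega)]
      simp only [Prod.mk.injEq]
      exact ⟨by omega, trivial⟩

-- characterisation of the second while loop
theorem zDscanR_spec (seats : List Int) (L : Nat) (hLn : L < seats.length)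
    (hL1 : seats[L] = 1) (hLmax : ∀ k : Nat, L < k → (hk : k < seats.length) → seats[k] ≠ 1) :
    ∀ (fuel : Nat) (j z : Int), (L : Int) ≤ j → j < seats.length → j - L < fuel →
      zDscanR seats fuel j z = (z + (j - (L : Int)), (L : Int)) := by
  intro fuel
  induction fuel with
  | zero => intro j z h1 h2 h3; omega
  | succ f ih =>
    intro j z h1 h2 h3
    have hj0 : 0 ≤ j := le_trans (by omega) h1
    have hget := PySem.List.pyGet?_eq_some_getElem seats hj0 h2
    rcases eq_or_lt_of_le h1 with rfl | hLj
    · simp only [Int.toNat_natCast] at hget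
      simp only [zDscanR, hget, Option.getD_some, hL1, ne_eq, not_true_eq_false, if_false]
      simp only [Prod.mk.injEq]
      exact ⟨by omega, trivial⟩
    · have hne : seats[j.toNat] ≠ 1 := hLmax j.toNat (by omega) (by omega)
      simp only [zDscanR, hget, Option.getD_some, ne_eq, hne, not_false_eq_true, if_true]
      rw [ih (j - 1) (z + 1) (by omega) (by omega) (by omega)]
      simp only [Prod.mk.injEq]
      exact ⟨by omega, trivial⟩

-- the third loop over a run of unoccupied seats just advances the counter
theorem pv_run (seats : List Int) :
    ∀ (t : Nat) (c d z md : Int), (d - c).toNat = t → c ≤ d → 0 ≤ z →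
      PySem.Int.floordiv (z + 1) 2 ≤ md →
      (∀ k : Int, c ≤ k → k < d → (PySem.List.pyGet? seats k).getD 0 ≠ 1) →
      (PySem.List.pyRange c d 1).foldl (zDstep seats) (z, md)
      = (z + (d - c), max md (PySem.Int.floordiv (z + (d - c) + 1) 2)) := by
  intro t
  induction t with
  | zero =>
    intro c d z md ht hcd hz hmd hno
    have hdc : d = c := by omega
    subst hdc
    rw [PySem.List.pyRange_one_eq_nil le_rfl]
    rw [pv_fdiv2] at hmd ⊢
    simp only [List.foldl_nil, Prod.mk.injEq]
    omega
  | succ t ih =>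
    intro c d z md ht hcd hz hmd hno
    have hlt : c < d := by omega
    rw [PySem.List.pyRange_one_cons hlt, List.foldl_cons]
    have hc : (PySem.List.pyGet? seats c).getD 0 ≠ 1 := hno c le_rfl hlt
    have hstep : zDstep seats (z, md) c = (z + 1, max (PySem.Int.floordiv (z + 1 + 1) 2) md) := by
      simp only [zDstep, hc, if_false]
    rw [hstep]
    rw [ih (c + 1) d (z + 1) (max (PySem.Int.floordiv (z + 1 + 1) 2) md) (by omega) (by omega)
      (by omega) (le_max_left _ _) (fun k hk1 hk2 => hno k (by omega) hk2)]
    simp only [pv_fdiv2] at *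
    simp only [Prod.mk.injEq]
    omega

-- the third loop over a segment whose one-positions are exactly os computes B's pair fold
theorem pv_seg (seats : List Int) :
    ∀ (os : List Int) (a : Int), os.head? = some a → os.Pairwise (· < ·) →
      (∀ k : Int, a ≤ k → k ≤ os.getLastD 0 →
        ((PySem.List.pyGet? seats k).getD 0 = 1 ↔ k ∈ os)) →
      ∀ (z md : Int), 0 ≤ md →
        ((PySem.List.pyRange a (os.getLastD 0 + 1) 1).foldl (zDstep seats) (z, md)).2
        = (os.zip os.tail).foldl (fun best p => max best (PySem.Int.floordiv (p.2 - p.1) 2)) md := by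
  intro os
  induction os with
  | nil => intro a h; cases h
  | cons a rest ih =>
    intro a0 hhead hpw hchar z md hmd
    simp only [List.head?_cons, Option.some.injEq] at hhead
    subst hhead
    cases rest with
    | nil =>
      have hl : ([a] : List Int).getLastD 0 = a := by
        rw [List.getLastD_cons]
        rfl
      rw [hl] at hchar ⊢
      rw [PySem.List.pyRange_one_singleton, List.foldl_cons]
      have h1 : (PySem.List.pyGet? seats a).getD 0 = 1 := by
        rw [hchar a le_rfl le_rfl]
        exact List.mem_cons_self
      have hstep : zDstep seats (z, md) a = (0, max (PySem.Int.floordiv (0 + 1) 2) md) := by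
        simp only [zDstep, h1, if_true]
      rw [hstep]
      simp only [List.foldl_nil, List.tail_cons, List.zip_nil_right]
      rw [pv_fdiv2]
      omega
    | cons b rest' =>
      have hab : a < b := List.rel_of_pairwise_cons hpw List.mem_cons_self
      have hlast : (a :: b :: rest').getLastD 0 = (b :: rest').getLastD 0 := by
        rw [List.getLastD_cons]
        exact pv_getLastD_irrel _ (by simp) a 0
      have hbl : b ≤ (b :: rest').getLastD 0 :=
        pv_le_getLastD _ 0 hpw.of_cons b List.mem_cons_self
      rw [hlast] at hchar ⊢
      set l := (b :: rest').getLastD 0 with hl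
      rw [PySem.List.pyRange_one_append a b (l + 1) (by omega) (by omega), List.foldl_append,
        PySem.List.pyRange_one_cons hab, List.foldl_cons]
      have h1 : (PySem.List.pyGet? seats a).getD 0 = 1 := by
        rw [hchar a le_rfl (by omega)]
        exact List.mem_cons_self
      have hstep : zDstep seats (z, md) a = (0, max (PySem.Int.floordiv (0 + 1) 2) md) := by
        simp only [zDstep, h1, if_true]
      have hmax0 : max (PySem.Int.floordiv (0 + 1) 2) md = md := by
        rw [pv_fdiv2]; omega
      rw [hstep, hmax0]
      have hmid : ∀ k : Int, a + 1 ≤ k → k < b → (PySem.List.pyGet? seats k).getD 0 ≠ 1 := by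
        intro k hk1 hk2 hcon
        have hmem := (hchar k (by omega) (by omega)).mp hcon
        rcases List.mem_cons.mp hmem with rfl | hmem'
        · omega
        · exact absurd (pv_head_le b k rest' hpw.of_cons hmem') (by omega)
      rw [pv_run seats (b - (a + 1)).toNat (a + 1) b 0 md rfl (by omega) le_rfl
        (by rw [pv_fdiv2]; omega) hmid]
      have harg : 0 + (b - (a + 1)) + 1 = b - a := by ring
      rw [harg]
      have hchar' : ∀ k : Int, b ≤ k → k ≤ l →
          ((PySem.List.pyGet? seats k).getD 0 = 1 ↔ k ∈ b :: rest') := by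
        intro k hk1 hk2
        rw [hchar k (by omega) hk2]
        constructor
        · intro h
          rcases List.mem_cons.mp h with rfl | h'
          · omega
          · exact h'
        · intro h
          exact List.mem_cons_of_mem a h
      have hzip : ((a :: b :: rest').zip (a :: b :: rest').tail)
          = (a, b) :: ((b :: rest').zip (b :: rest').tail) := rfl
      rw [hzip, List.foldl_cons]
      exact ih b rfl hpw.of_cons hchar' (0 + (b - (a + 1)))
        (max md (PySem.Int.floordiv (b - a) 2)) (le_trans hmd (le_max_left _ _))

-- ===== VERDICT (by name: the statement is the Claim_ definition above) =====
theorem zmaxDistToClosest_py_spec : Claim_equal_zmaxDistToClosest_py := by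
  intro seats _ hpre
  unfold Spec_zmaxDistToClosest_py zmaxDistToClosest_py zmaxDistToClosest_py_alt
  have hne := pvOnes_ne_nil seats hpre
  obtain ⟨f, rest, hones⟩ : ∃ f rest, pvOnes seats = f :: rest := by
    cases h : pvOnes seats with
    | nil => exact absurd h hne
    | cons f rest => exact ⟨f, rest, rfl⟩
  have hpw := pvOnes_pairwise seats
  have hf_mem : f ∈ pvOnes seats := by rw [hones]; exact List.mem_cons_self
  have hl_mem : (pvOnes seats).getLastD 0 ∈ pvOnes seats := pv_getLastD_mem _ _ hne
  set l := (pvOnes seats).getLastD 0 with hldef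
  obtain ⟨F, hFn, hfF, hF1⟩ := (pvOnes_mem seats f).mp hf_mem
  obtain ⟨L, hLn, hlL, hL1⟩ := (pvOnes_mem seats l).mp hl_mem
  have hf_min : ∀ x ∈ pvOnes seats, f ≤ x := by
    intro x hx
    rw [hones] at hpw hx
    exact pv_head_le f x rest hpw hx
  have hl_max : ∀ x ∈ pvOnes seats, x ≤ l := fun x hx => pv_le_getLastD _ 0 hpw x hx
  have hFmin : ∀ k : Nat, k < F → (hk : k < seats.length) → seats[k] ≠ 1 := by
    intro k hkF hk hcon
    have := hf_min (k : Int) ((pvOnes_mem seats k).mpr ⟨k, hk, rfl, hcon⟩)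
    omega
  have hLmax : ∀ k : Nat, L < k → (hk : k < seats.length) → seats[k] ≠ 1 := by
    intro k hkL hk hcon
    have := hl_max (k : Int) ((pvOnes_mem seats k).mpr ⟨k, hk, rfl, hcon⟩)
    omega
  have h1 : zDscanL seats seats.length 0 0 = (f, F) := by
    rw [zDscanL_spec seats F hFn hF1 hFmin seats.length 0 0 (Nat.zero_le F) (by omega), hfF]
    simp only [Prod.mk.injEq]
    exact ⟨by omega, trivial⟩
  have h2 : zDscanR seats seats.length ((seats.length : Int) - 1) 0
      = ((seats.length : Int) - 1 - l, l) := by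
    rw [zDscanR_spec seats L hLn hL1 hLmax seats.length ((seats.length : Int) - 1) 0
      (by omega) (by omega) (by omega), hlL]
    simp only [Prod.mk.injEq]
    exact ⟨by omega, trivial⟩
  simp only [h1, h2]
  have hchar : ∀ k : Int, f ≤ k → k ≤ l →
      ((PySem.List.pyGet? seats k).getD 0 = 1 ↔ k ∈ pvOnes seats) := by
    intro k hk1 hk2
    have hk0 : 0 ≤ k := le_trans (by omega) hk1
    have hkn : k < (seats.length : Int) := by omega
    rw [PySem.List.pyGet?_eq_some_getElem seats hk0 hkn, Option.getD_some]
    constructor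
    · intro h
      have hmem := (pvOnes_mem seats (k.toNat : Int)).mpr ⟨k.toNat, by omega, rfl, h⟩
      rwa [Int.toNat_of_nonneg hk0] at hmem
    · intro h
      obtain ⟨K, hK, hkK, hK1⟩ := (pvOnes_mem seats k).mp h
      subst hkK
      simpa using hK1
  have hhead : (pvOnes seats).head? = some f := by rw [hones]; rfl
  have hseg := pv_seg seats (pvOnes seats) f hhead hpw hchar 0
    (max (max 1 f) ((seats.length : Int) - 1 - l)) (by omega)
  rw [← hldef] at hseg
  have hIcast : Int.ofNat F = f := by rw [hfF]; rfl
  rw [hIcast]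
  rw [hseg]
  conv_rhs => rw [hones]
  simp only [← hones, ← hldef]
  have hinit : max (max 1 f) ((seats.length : Int) - 1 - l)
      = max (max f ((seats.length : Int) - 1 - l)) 1 := by omega
  rw [hinit]
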